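-- pv_equiv track=rewrite | github.com/andre15silva/LEIC-A | GramaticaGuru_MJ.py | conjunto_palavras_para_cadeia
-- ===== SOURCE A (Python) =====
-- def palavra_tamanho(palavra_pot):
-- 	return len(palavra_pot)
--
-- def palavra_potencial_para_cadeia(palavra_pot):
-- 	return palavra_pot
--
-- def conjunto_palavras_para_cadeia(conj_palavras):
-- 	dic_palavras = {}
-- 	cad_car = ''
--
-- 	for palavra_pot in conj_palavras:
-- 		tamanho = palavra_tamanho(palavra_pot)
-- 		if tamanho in dic_palavras:
-- 			dic_palavras[tamanho] += [palavra_potencial_para_cadeia(palavra_pot)]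
-- 		else:
-- 			dic_palavras[tamanho] = [palavra_potencial_para_cadeia(palavra_pot)]
--
-- 	for i in sorted(dic_palavras):
-- 		cad_car += str(i) + "->["
-- 		for p in sorted(dic_palavras[i]):
-- 			cad_car += p + ", "
-- 		cad_car = cad_car[:-2] + "];"
--
-- 	return '[' + cad_car[:-1] + "]"
-- ===== SOURCE B (Python) =====
-- def _blocos(ws):
--     # ws is sorted by (len, word); emit one block per run of equal lengths
--     if not ws:
--         return []
--     n = len(ws[0])
--     k = 1
--     while k < len(ws) and len(ws[k]) == n:
--         k += 1
--     return [str(n) + "->[" + ", ".join(ws[:k]) + "]"] + _blocos(ws[k:])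
--
-- def conjunto_palavras_para_cadeia(conj_palavras):
--     return "[" + ";".join(_blocos(sorted(conj_palavras, key=lambda w: (len(w), w)))) + "]"
-- ===== Notes on version B (the rewrite author's own statement) =====
-- stated objective: idiomatic
-- what changed: Replaced the length-keyed dict with per-key sorting and manual string surgery (appending ', '/';' then slicing them off) by a single sort on the key (len, word) followed by a linear scan over consecutive equal-length runs, assembled with str.join.
import Mathlib
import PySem

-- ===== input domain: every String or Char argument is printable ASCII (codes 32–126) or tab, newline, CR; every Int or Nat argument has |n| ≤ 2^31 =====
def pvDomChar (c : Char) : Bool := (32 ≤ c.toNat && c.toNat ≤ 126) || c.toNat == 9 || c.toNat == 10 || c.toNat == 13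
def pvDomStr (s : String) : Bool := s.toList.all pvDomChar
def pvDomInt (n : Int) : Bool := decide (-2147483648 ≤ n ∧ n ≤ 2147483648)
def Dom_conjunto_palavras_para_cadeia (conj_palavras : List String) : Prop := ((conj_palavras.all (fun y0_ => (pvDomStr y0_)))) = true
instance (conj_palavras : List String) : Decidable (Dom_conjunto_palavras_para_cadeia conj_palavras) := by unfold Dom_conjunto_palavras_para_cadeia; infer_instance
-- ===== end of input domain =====

-- ===== PORT A =====
-- B replaces A's length-keyed dict + per-group sorting + trailing-separator slicing by one
-- sort on the key (len, word) and a linear scan over equal-length runs assembled with join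
-- (objective: idiomatic; same result, same asymptotic cost).
def palavra_tamanho (palavra_pot : String) : Int := PySem.Str.len palavra_pot

def palavra_potencial_para_cadeia (palavra_pot : String) : String := palavra_pot

-- body of A's first for-loop (builds dic_palavras)
def pvDicStep (dic_palavras : PySem.Dict Int (List String)) (palavra_pot : String) :
    PySem.Dict Int (List String) :=
  let tamanho := palavra_tamanho palavra_pot
  match dic_palavras.get? tamanho with
  | some l => dic_palavras.insert tamanho (l ++ [palavra_potencial_para_cadeia palavra_pot])
  | none   => dic_palavras.insert tamanho [palavra_potencial_para_cadeia palavra_pot]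

-- body of A's second for-loop (one key i: "i->[" , the words, then chop ", " and add "];")
def pvOuterStep (dic_palavras : PySem.Dict Int (List String)) (cad_car : List Char) (i : Int) :
    List Char :=
  let cad_car := cad_car ++ PySem.Int.toChars i ++ ['-', '>', '[']
  let cad_car := (PySem.List.sorted (dic_palavras.getD i []) id).foldl
    (fun cad_car p => cad_car ++ p.toList ++ [',', ' ']) cad_car
  PySem.List.slice cad_car none (some (-2)) ++ [']', ';']

def conjunto_palavras_para_cadeia (conj_palavras : List String) : String :=
  let dic_palavras := conj_palavras.foldl pvDicStep PySem.Dict.empty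
  let cad_car := (PySem.List.sorted dic_palavras.keys id).foldl (pvOuterStep dic_palavras) []
  String.ofList ('[' :: PySem.List.slice cad_car none (some (-1)) ++ [']'])

-- ===== PORT B =====
-- sort key (len(w), w), compared as Python compares tuples (lexicographically)
def pvKey (w : String) : Lex (Int × String) := toLex (PySem.Str.len w, w)

-- one block per run of equal lengths in a (len, word)-sorted list (Source B's _blocos)
def pvBlocos : List String → List String
  | [] => []
  | w :: ws =>
    let n := PySem.Str.len w
    (PySem.Int.toStr n ++ "->[" ++
        PySem.Str.join ", " (w :: ws.takeWhile (fun x => PySem.Str.len x == n)) ++ "]")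
      :: pvBlocos (ws.dropWhile (fun x => PySem.Str.len x == n))
  termination_by ws => ws.length
  decreasing_by simpa using Nat.lt_succ_of_le (List.length_dropWhile_le _ _)

def conjunto_palavras_para_cadeia_alt (conj_palavras : List String) : String :=
  "[" ++ PySem.Str.join ";" (pvBlocos (PySem.List.sorted conj_palavras pvKey)) ++ "]"

-- ===== PRECONDITION & SPEC =====
def Spec_conjunto_palavras_para_cadeia (conj_palavras : List String) (out : String) : Prop := out = conjunto_palavras_para_cadeia_alt conj_palavras
instance (conj_palavras : List String) (out : String) : Decidable (Spec_conjunto_palavras_para_cadeia conj_palavras out) := by unfold Spec_conjunto_palavras_para_cadeia; infer_instance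

-- ===== CLAIM (what is proved, stated in full; the proofs are below) =====
def Claim_equal_conjunto_palavras_para_cadeia : Prop := ∀ (conj_palavras : List String), Dom_conjunto_palavras_para_cadeia conj_palavras → Spec_conjunto_palavras_para_cadeia conj_palavras (conjunto_palavras_para_cadeia conj_palavras)

-- ===== LEMMAS AND PROOFS =====

-- the sorted distinct lengths, and the sorted group of words of one length
def pvLens (conj : List String) : List Int :=
  PySem.List.sorted (PySem.List.dedup (conj.map PySem.Str.len)) id
def pvGrupo (conj : List String) (L : Int) : List String :=
  PySem.List.sorted (conj.filter (fun w => PySem.Str.len w == L)) id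
-- the character block "L->[w1, w2, …]" for one length
def pvBloco (L : Int) (ps : List String) : List Char :=
  PySem.Int.toChars L ++ ['-', '>', '['] ++
    PySem.Chars.join [',', ' '] (ps.map String.toList) ++ [']']
-- the canonical result both ports are reduced to
def pvCanon (conj : List String) : List Char :=
  '[' :: PySem.Chars.join [';'] ((pvLens conj).map (fun L => pvBloco L (pvGrupo conj L))) ++ [']']

-- ---- generic helpers ----

theorem pv_take_app {α : Type} (l₁ l₂ : List α) (n : Nat) :
    (l₁ ++ l₂).take (l₁.length + n) = l₁ ++ l₂.take n := by
  rw [List.take_append]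
  simp [List.take_of_length_le]

def pvChunks (ps : List String) : List Char :=
  (ps.map (fun p => p.toList ++ [',', ' '])).flatten

theorem pv_span_all {p : String → Bool} {g r : List String}
    (hg : ∀ x ∈ g, p x = true) (hr : ∀ x ∈ r, p x = false) :
    (g ++ r).takeWhile p = g ∧ (g ++ r).dropWhile p = r := by
  induction g with
  | nil =>
    simp only [List.nil_append]
    cases r with
    | nil => simp
    | cons h t => simp [hr h (by simp)]
  | cons a g' ih =>
    have ha := hg a (by simp)
    have ⟨h1, h2⟩ := ih (fun x hx => hg x (by simp [hx]))
    simp [ha, h1, h2]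

theorem pv_chunks_len {ps : List String} (h : ps ≠ []) : 2 ≤ (pvChunks ps).length := by
  cases ps with
  | nil => exact absurd rfl h
  | cons p rest => simp [pvChunks]; omega

theorem pv_chunks_take {ps : List String} (h : ps ≠ []) :
    (pvChunks ps).take ((pvChunks ps).length - 2) =
      PySem.Chars.join [',', ' '] (ps.map String.toList) := by
  induction ps with
  | nil => exact absurd rfl h
  | cons p rest ih =>
    cases rest with
    | nil =>
      simp [pvChunks, PySem.Chars.join_singleton]
    | cons q rs =>
      have hlen := pv_chunks_len (ps := q :: rs) (by simp)
      have : pvChunks (p :: q :: rs) = (p.toList ++ [',', ' ']) ++ pvChunks (q :: rs) := by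
        simp [pvChunks]
      rw [this]
      have harith : ((p.toList ++ [',', ' ']) ++ pvChunks (q :: rs)).length - 2
          = (p.toList ++ [',', ' ']).length + ((pvChunks (q :: rs)).length - 2) := by
        simp; omega
      rw [harith, pv_take_app, ih (by simp)]
      simp [PySem.Chars.join_cons_cons]
theorem pv_slice2 (cad : List Char) {ps : List String} (h : ps ≠ []) :
    PySem.List.slice (cad ++ pvChunks ps) none (some (-2)) =
      cad ++ PySem.Chars.join [',', ' '] (ps.map String.toList) := by
  rw [PySem.List.slice_to_neg_ofNat _ 2 (by norm_num)]
  have hlen := pv_chunks_len h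
  have harith : (cad ++ pvChunks ps).length - 2 = cad.length + ((pvChunks ps).length - 2) := by
    simp; omega
  rw [harith, pv_take_app, pv_chunks_take h]

theorem pv_dropLast_blocks (bs : List (List Char)) :
    PySem.List.slice ((bs.map (fun b => b ++ [';'])).flatten) none (some (-1)) =
      PySem.Chars.join [';'] bs := by
  rw [PySem.List.slice_to_neg_one]
  induction bs with
  | nil => simp [PySem.Chars.join_nil]
  | cons b rest ih =>
    cases rest with
    | nil => simp [PySem.Chars.join_singleton]
    | cons c rs =>
      have hne : ((List.map (fun b => b ++ [';']) (c :: rs)).flatten).isEmpty = false := by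
        simp
      rw [List.map_cons, List.flatten_cons, List.dropLast_append, hne]
      simp only [ih, PySem.Chars.join_cons_cons]
      simp

-- ---- the dict A builds ----

theorem pv_step_eq_modify (d : PySem.Dict Int (List String)) (w : String) :
    pvDicStep d w = d.modify (PySem.Str.len w) [] (fun x => x ++ [w]) := by
  unfold pvDicStep palavra_tamanho palavra_potencial_para_cadeia PySem.Dict.modify
  cases h : d.get? (PySem.Str.len w) <;>
    simp only [PySem.Dict.getD_eq_get?_getD, h, Option.getD_none, Option.getD_some,
      List.nil_append]

theorem pv_dic_getD (conj : List String) (L : Int) :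
    (conj.foldl pvDicStep PySem.Dict.empty).getD L [] =
      conj.filter (fun w => PySem.Str.len w == L) := by
  have hstep : pvDicStep = fun d w => d.modify (PySem.Str.len w) [] (fun x => x ++ [w]) := by
    funext d w; exact pv_step_eq_modify d w
  rw [hstep]
  have hmap : conj.foldl (fun d w => d.modify (PySem.Str.len w) [] (fun x => x ++ [w]))
        PySem.Dict.empty
      = (conj.map (fun w => (PySem.Str.len w, w))).foldl
          (fun d p => d.modify p.1 [] (fun x => x ++ [p.2])) PySem.Dict.empty := by
    rw [List.foldl_map]
  rw [hmap, PySem.Dict.getD_foldl_modify_append]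
  simp [List.filter_map, Function.comp_def]

theorem pv_dic_keys (conj : List String) :
    (conj.foldl pvDicStep PySem.Dict.empty).keys = PySem.List.dedup (conj.map PySem.Str.len) := by
  have hstep : pvDicStep = fun d w => d.modify (PySem.Str.len w) [] (fun x => x ++ [w]) := by
    funext d w; exact pv_step_eq_modify d w
  rw [hstep, PySem.Dict.keys_foldl_modify_key conj PySem.Str.len [] (fun _ w => fun x => x ++ [w]),
    PySem.List.dedup_eq_ofList]
  rfl

theorem pv_grupo_ne_nil {conj : List String} {L : Int} (h : L ∈ pvLens conj) :
    pvGrupo conj L ≠ [] := by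
  intro hnil
  rw [pvGrupo, PySem.List.sorted_eq_nil_iff] at hnil
  rw [pvLens, PySem.List.mem_sorted, PySem.List.mem_dedup] at h
  obtain ⟨w, hw, hlw⟩ := List.mem_map.mp h
  have hmem : w ∈ conj.filter (fun w => PySem.Str.len w == L) :=
    List.mem_filter.mpr ⟨hw, by simpa using hlw⟩
  rw [hnil] at hmem
  simp at hmem

-- ---- A equals the canonical form ----

theorem pv_outer (conj : List String) (lens : List Int)
    (hne : ∀ L ∈ lens, pvGrupo conj L ≠ []) (cad : List Char) :
    lens.foldl (pvOuterStep (conj.foldl pvDicStep PySem.Dict.empty)) cad =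
      cad ++ (((lens.map (fun L => pvBloco L (pvGrupo conj L))).map (fun b => b ++ [';'])).flatten) := by
  induction lens generalizing cad with
  | nil => simp
  | cons L rest ih =>
    simp only [List.foldl_cons, List.map_cons, List.flatten_cons]
    have hbody : pvOuterStep (conj.foldl pvDicStep PySem.Dict.empty) cad L =
        cad ++ (pvBloco L (pvGrupo conj L) ++ [';']) := by
      simp only [pvOuterStep]
      rw [pv_dic_getD]
      have hfun : (fun (cad_car : List Char) (p : String) => cad_car ++ p.toList ++ [',', ' '])
          = fun cad_car p => cad_car ++ (p.toList ++ [',', ' ']) := by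
        funext c p; simp
      rw [hfun, PySem.List.foldl_append_eq_flatMap]
      have hflat : (PySem.List.sorted (conj.filter (fun w => PySem.Str.len w == L)) id).flatMap
            (fun p => p.toList ++ [',', ' ']) = pvChunks (pvGrupo conj L) := by
        simp [pvChunks, pvGrupo, List.flatMap_def]
      rw [hflat, pv_slice2 _ (hne L (by simp))]
      simp [pvBloco]
    rw [hbody, ih (fun L' h => hne L' (by simp [h]))]
    simp

theorem pvA_canon (conj : List String) :
    conjunto_palavras_para_cadeia conj = String.ofList (pvCanon conj) := by
  unfold conjunto_palavras_para_cadeia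
  simp only []
  rw [pv_dic_keys]
  have h := pv_outer conj (pvLens conj) (fun L h => pv_grupo_ne_nil h) []
  unfold pvLens at h
  rw [h, List.nil_append, pv_dropLast_blocks]
  rfl

-- ---- B equals the canonical form ----

theorem pv_str_ext {s t : String} (h : s.toList = t.toList) : s = t := by
  have hs : String.ofList s.toList = s := String.ofList_toList
  have ht : String.ofList t.toList = t := String.ofList_toList
  rw [← hs, h, ht]

theorem pv_mem_grupo {conj : List String} {L : Int} {x : String} :
    x ∈ pvGrupo conj L ↔ x ∈ conj ∧ PySem.Str.len x = L := by
  rw [pvGrupo, PySem.List.mem_sorted, List.mem_filter]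
  simp

theorem pv_perm (lens : List Int) (xs : List String) (hnd : lens.Nodup)
    (hcov : ∀ w ∈ xs, PySem.Str.len w ∈ lens) :
    ((lens.map (fun L => PySem.List.sorted (xs.filter (fun w => PySem.Str.len w == L)) id)).flatten).Perm
      xs := by
  induction lens generalizing xs with
  | nil =>
    cases xs with
    | nil => simp
    | cons a t => exact absurd (hcov a (by simp)) (List.not_mem_nil)
  | cons L rest ih =>
    simp only [List.map_cons, List.flatten_cons]
    have h1 : (PySem.List.sorted (xs.filter fun w => PySem.Str.len w == L) id).Perm
        (xs.filter fun w => PySem.Str.len w == L) := PySem.List.sorted_perm _ id false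
    have hfe : ∀ L' ∈ rest, xs.filter (fun w => PySem.Str.len w == L') =
        (xs.filter (fun w => !(PySem.Str.len w == L))).filter (fun w => PySem.Str.len w == L') := by
      intro L' hL'
      have hne : L' ≠ L := by
        rintro rfl; exact (List.nodup_cons.mp hnd).1 hL'
      rw [List.filter_filter]
      apply List.filter_congr
      intro a _
      by_cases h : (a.length : Int) = L'
      · simp [h, hne]
      · simp [h]
    have hmapeq : rest.map (fun L' => PySem.List.sorted (xs.filter (fun w => PySem.Str.len w == L')) id)
        = rest.map (fun L' => PySem.List.sorted
            ((xs.filter (fun w => !(PySem.Str.len w == L))).filter (fun w => PySem.Str.len w == L')) id) :=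
      List.map_congr_left fun L' h => by rw [hfe L' h]
    rw [hmapeq]
    have ihp := ih (xs := xs.filter (fun w => !(PySem.Str.len w == L))) (List.nodup_cons.mp hnd).2
      (by
        intro w hw
        have ⟨hw1, hw2⟩ := List.mem_filter.mp hw
        have := hcov w hw1
        simp only [List.mem_cons] at this
        rcases this with h | h
        · exfalso
          have h' : (w.length : Int) = L := by simpa using h
          simp [h'] at hw2
        · exact h)
    exact (h1.append ihp).trans (List.filter_append_perm _ xs)

theorem pv_lens_lt (conj : List String) : List.Pairwise (· < ·) (pvLens conj) := by
  have hle : List.Pairwise (fun a b => a ≤ b) (pvLens conj) := by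
    have := PySem.List.sorted_pairwise (PySem.List.dedup (conj.map PySem.Str.len)) (id (α := Int))
    simpa [pvLens] using this
  have hnd : (pvLens conj).Nodup :=
    (PySem.List.sorted_perm _ id false).symm.nodup (PySem.List.nodup_dedup _)
  exact (hle.and hnd).imp (fun h => lt_of_le_of_ne h.1 h.2)

theorem pv_pairwise (conj : List String) :
    List.Pairwise (fun a b => pvKey a ≤ pvKey b) (((pvLens conj).map (pvGrupo conj)).flatten) := by
  rw [List.pairwise_flatten]
  constructor
  · intro l hl
    obtain ⟨L, hL, rfl⟩ := List.mem_map.mp hl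
    have hp : List.Pairwise (fun (a b : String) => a ≤ b) (pvGrupo conj L) := by
      have := PySem.List.sorted_pairwise (conj.filter (fun w => PySem.Str.len w == L)) (id (α := String))
      simpa [pvGrupo] using this
    refine hp.imp_of_mem ?_
    intro a b ha hb hle
    have hla := (pv_mem_grupo.mp ha).2
    have hlb := (pv_mem_grupo.mp hb).2
    rw [pvKey, pvKey, Prod.Lex.toLex_le_toLex]
    exact Or.inr ⟨by rw [hla, hlb], hle⟩
  · rw [List.pairwise_map]
    refine (pv_lens_lt conj).imp ?_
    intro L1 L2 h12 x hx y hy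
    have hx2 := (pv_mem_grupo.mp hx).2
    have hy2 := (pv_mem_grupo.mp hy).2
    rw [pvKey, pvKey, Prod.Lex.toLex_le_toLex]
    exact Or.inl (by rw [hx2, hy2]; exact h12)

theorem pv_sorted_key_eq (conj : List String) :
    PySem.List.sorted conj pvKey = ((pvLens conj).map (pvGrupo conj)).flatten := by
  apply List.Perm.eq_of_pairwise (le := fun a b => pvKey a ≤ pvKey b)
  · intro a b _ _ h1 h2
    have hk : pvKey a = pvKey b := le_antisymm h1 h2
    rw [pvKey, pvKey] at hk
    exact congrArg Prod.snd (congrArg ofLex hk)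
  · exact PySem.List.sorted_pairwise conj pvKey
  · exact pv_pairwise conj
  · refine (PySem.List.sorted_perm conj pvKey false).trans ?_
    refine (pv_perm (pvLens conj) conj ?_ ?_).symm
    · exact (PySem.List.sorted_perm _ id false).symm.nodup (PySem.List.nodup_dedup _)
    · intro w hw
      rw [pvLens, PySem.List.mem_sorted, PySem.List.mem_dedup]
      exact List.mem_map_of_mem hw

theorem pv_bloco_str (L : Int) (ps : List String) :
    PySem.Int.toStr L ++ "->[" ++ PySem.Str.join ", " ps ++ "]" = String.ofList (pvBloco L ps) := by
  apply pv_str_ext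
  simp only [String.toList_append, PySem.Str.toList_join, PySem.Int.toList_toStr,
    String.toList_ofList, pvBloco]
  rfl

theorem pv_blocos_aux (conj : List String) (lens : List Int) (hnd : lens.Nodup)
    (hne : ∀ L ∈ lens, pvGrupo conj L ≠ []) :
    pvBlocos ((lens.map (pvGrupo conj)).flatten) =
      lens.map (fun L => String.ofList (pvBloco L (pvGrupo conj L))) := by
  induction lens with
  | nil => simp [pvBlocos]
  | cons L rest ih =>
    obtain ⟨w, g0, hg⟩ : ∃ w g0, pvGrupo conj L = w :: g0 := by
      cases h : pvGrupo conj L with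
      | nil => exact absurd h (hne L (by simp))
      | cons w g0 => exact ⟨w, g0, rfl⟩
    have hwL : PySem.Str.len w = L := (pv_mem_grupo.mp (hg ▸ List.mem_cons_self)).2
    have hspan := pv_span_all (p := fun x => PySem.Str.len x == PySem.Str.len w) (g := g0)
      (r := (rest.map (pvGrupo conj)).flatten)
      (by
        intro x hx
        have hx' : (x.length : Int) = L := by
          simpa using (pv_mem_grupo.mp (hg ▸ List.mem_cons_of_mem w hx)).2
        have hw' : (w.length : Int) = L := by simpa using hwL
        simp only [beq_iff_eq, PySem.Str.len_eq, String.length_toList]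
        omega)
      (by
        intro x hx
        obtain ⟨l, hl, hxl⟩ := List.mem_flatten.mp hx
        obtain ⟨L', hL', rfl⟩ := List.mem_map.mp hl
        have hx' : (x.length : Int) = L' := by simpa using (pv_mem_grupo.mp hxl).2
        have hw' : (w.length : Int) = L := by simpa using hwL
        have hLne : L' ≠ L := by
          rintro rfl; exact (List.nodup_cons.mp hnd).1 hL'
        simp only [beq_eq_false_iff_ne, ne_eq, PySem.Str.len_eq, String.length_toList]
        intro hc
        exact hLne (by omega))
    simp only [List.map_cons, List.flatten_cons, hg, List.cons_append]
    rw [pvBlocos, hspan.1, hspan.2, ih (List.nodup_cons.mp hnd).2 (fun L' h => hne L' (by simp [h]))]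
    rw [hwL, pv_bloco_str]

theorem pv_blocos_eq (conj : List String) :
    pvBlocos (PySem.List.sorted conj pvKey) =
      (pvLens conj).map (fun L => String.ofList (pvBloco L (pvGrupo conj L))) := by
  rw [pv_sorted_key_eq]
  exact pv_blocos_aux conj (pvLens conj)
    ((PySem.List.sorted_perm _ id false).symm.nodup (PySem.List.nodup_dedup _))
    (fun L h => pv_grupo_ne_nil h)

theorem pvB_canon (conj : List String) :
    conjunto_palavras_para_cadeia_alt conj = String.ofList (pvCanon conj) := by
  unfold conjunto_palavras_para_cadeia_alt
  rw [pv_blocos_eq]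
  apply pv_str_ext
  simp only [String.toList_append, PySem.Str.toList_join, List.map_map, Function.comp_def,
    String.toList_ofList, String.toList_ofList, pvCanon]
  rfl

-- ===== VERDICT (by name: the statement is the Claim_ definition above) =====
theorem conjunto_palavras_para_cadeia_spec : Claim_equal_conjunto_palavras_para_cadeia := by
  intro conj _
  unfold Spec_conjunto_palavras_para_cadeia
  rw [pvA_canon, pvB_canon]
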